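-- pv_equiv track=rewrite | github.com/brownbreeze/StudyCodingTest | programmers/3_베스트앨범/source_20231118.py | solution
-- ===== SOURCE A (Python) =====
-- def solution(genres, plays):
--     answer = []
--     temp = []
--     len_song = len(genres)
--     genres_dict = dict()
--     for i in range(len_song):
--         if genres[i] in genres_dict:
--             genres_dict[genres[i]][0] += plays[i]
--             genres_dict[genres[i]][1].append([i, plays[i]])
--         else:
--             genres_dict[genres[i]] = [plays[i], [[i, plays[i]]]]
--
--     for gen_name in genres_dict:
--         genres_dict[gen_name][1].sort(key = lambda item : item[1], reverse=True)
--     sorted_dict = sorted(genres_dict.items(), key = lambda item: item[1][0], reverse = True)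
--     max_len = min(2, len(genres_dict))
--     for i in range(len(genres_dict)):
--         k, value = sorted_dict[i]
--         value_list = value[1]
--         for j in range(2):
--             if len(value[1]) <= j: break
--             answer.append( value_list[j][0] )
--     return answer
-- ===== SOURCE B (Python) =====
-- def solution(genres, plays):
--     n = len(genres)
--     songs = [(i, plays[i]) for i in range(n)]
--     totals = {}
--     for g, p in zip(genres, plays):
--         totals[g] = totals.get(g, 0) + p
--     # genres by total plays descending; stable over first-appearance order
--     order = sorted(totals, key=lambda g: totals[g], reverse=True)
--     # one global stable sort: plays descending, equal plays keep ascending index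
--     by_plays = sorted(songs, key=lambda s: s[1], reverse=True)
--     # one grouping pass: per genre, its song indices in the globally sorted order
--     top2 = {}
--     for i, p in by_plays:
--         top2.setdefault(genres[i], []).append(i)
--     answer = []
--     for g in order:
--         answer += top2[g][:2]
--     return answer
-- ===== Notes on version B (the rewrite author's own statement) =====
-- stated objective: alternative
-- what changed: B replaces A's per-genre maintained song lists and per-genre sorts by one global stable sort of all songs by plays descending followed by a single grouping pass, with genre order from a totals dict built in one pass; A's answer loop over per-genre sorted lists becomes a lookup of the first two grouped indices per genre.
import Mathlib
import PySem

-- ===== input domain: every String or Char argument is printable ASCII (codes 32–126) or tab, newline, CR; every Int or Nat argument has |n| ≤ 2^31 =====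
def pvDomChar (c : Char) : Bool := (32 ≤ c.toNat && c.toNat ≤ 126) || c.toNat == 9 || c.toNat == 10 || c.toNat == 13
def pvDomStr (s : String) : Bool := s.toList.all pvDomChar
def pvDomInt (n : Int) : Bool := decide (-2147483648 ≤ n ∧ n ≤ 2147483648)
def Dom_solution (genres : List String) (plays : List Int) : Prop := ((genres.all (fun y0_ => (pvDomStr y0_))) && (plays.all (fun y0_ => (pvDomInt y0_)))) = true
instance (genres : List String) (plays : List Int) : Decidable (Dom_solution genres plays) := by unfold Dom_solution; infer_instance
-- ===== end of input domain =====

-- B replaces A's maintained per-genre song lists and per-genre sorts by ONE global stable sort of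
-- all songs plus a grouping scan per genre (objective: alternative decomposition, similar cost).

-- ===== PORT A =====
-- literal transliteration of Source A: a dict genre -> [total, [[i, plays[i]], …]], per-genre
-- reverse-stable sorts, dict items sorted by total descending, then top-2 per genre (the inner
-- 'for j in range(2)' with its break is unrolled for j = 0, 1; A's 'max_len' is dead code).
def solution (genres : List String) (plays : List Int) : List Int :=
  let lenSong : Int := PySem.List.len genres
  let gd : PySem.Dict String (Int × List (Int × Int)) :=
    (PySem.List.pyRange 0 lenSong 1).foldl (fun d i =>
      if d.contains (PySem.List.pyGetD genres i "") then
        let v := d.getD (PySem.List.pyGetD genres i "") (0, [])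
        d.insert (PySem.List.pyGetD genres i "")
          (v.1 + PySem.List.pyGetD plays i 0, v.2 ++ [(i, PySem.List.pyGetD plays i 0)])
      else
        d.insert (PySem.List.pyGetD genres i "")
          (PySem.List.pyGetD plays i 0, [(i, PySem.List.pyGetD plays i 0)])) PySem.Dict.empty
  let gd2 : PySem.Dict String (Int × List (Int × Int)) :=
    gd.keys.foldl (fun d genName =>
      let v := d.getD genName (0, [])
      d.insert genName (v.1, PySem.List.sorted v.2 (fun item => item.2) true)) gd
  let sortedDict := PySem.List.sorted gd2.items (fun item => item.2.1) true
  sortedDict.foldl (fun answer kv =>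
    let valueList := kv.2.2
    if PySem.List.len valueList ≤ 0 then answer
    else
      let answer := answer ++ [(PySem.List.pyGetD valueList 0 ((0 : Int), (0 : Int))).1]
      if PySem.List.len valueList ≤ 1 then answer
      else answer ++ [(PySem.List.pyGetD valueList 1 ((0 : Int), (0 : Int))).1]) []

-- ===== PORT B =====
-- literal transliteration of Source B: genre totals in one pass, one global stable sort of all songs
-- by plays descending, one grouping pass over it, genres by total descending, top-2 per genre.
def solution_alt (genres : List String) (plays : List Int) : List Int :=
  let n : Int := PySem.List.len genres
  let songs : List (Int × Int) :=
    (PySem.List.pyRange 0 n 1).map (fun i => (i, PySem.List.pyGetD plays i 0))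
  let totals : PySem.Dict String Int :=
    (genres.zip plays).foldl (fun d gp => d.insert gp.1 (d.getD gp.1 0 + gp.2)) PySem.Dict.empty
  let order := PySem.List.sorted totals.keys (fun g => totals.getD g 0) true
  let byPlays := PySem.List.sorted songs (fun s => s.2) true
  -- 'top2.setdefault(genres[i], []).append(i)' is Dict.modify with default []
  let top2 : PySem.Dict String (List Int) :=
    byPlays.foldl (fun d s =>
      d.modify (PySem.List.pyGetD genres s.1 "") [] (fun t => t ++ [s.1])) PySem.Dict.empty
  -- 'top2[g]': g is always a key here (totals and top2 share their key set), so getD is exact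
  order.foldl (fun answer g =>
    answer ++ PySem.List.slice (top2.getD g []) none (some 2)) []

-- ===== PRECONDITION & SPEC =====
-- Pre_ excludes only inputs where plays is shorter than genres: there A raises IndexError
-- on plays[i], and B raises the same IndexError in its own comprehension.
def Pre_solution (genres : List String) (plays : List Int) : Prop :=
  genres.length ≤ plays.length
instance (genres : List String) (plays : List Int) : Decidable (Pre_solution genres plays) := by
  unfold Pre_solution; infer_instance
def pvWitness_solution : List String × List Int :=
  (["pop", "rock", "pop", "rock", "pop"], [500, 600, 150, 800, 2500])
def Spec_solution (genres : List String) (plays : List Int) (out : List Int) : Prop :=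
  out = solution_alt genres plays
instance (genres : List String) (plays : List Int) (out : List Int) :
    Decidable (Spec_solution genres plays out) := by unfold Spec_solution; infer_instance

-- ===== CLAIM (what is proved, stated in full; the proofs are below) =====
def Claim_equal_solution : Prop := ∀ (genres : List String) (plays : List Int),
  Dom_solution genres plays → Pre_solution genres plays →
  Spec_solution genres plays (solution genres plays)

-- ===== LEMMAS AND PROOFS =====

-- proof-side abbreviations (used only below the claim block)
def pvG (genres : List String) (i : Int) : String := PySem.List.pyGetD genres i ""
def pvP (plays : List Int) (i : Int) : Int := PySem.List.pyGetD plays i 0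
def pvSongs (genres : List String) (plays : List Int) : List (Int × Int) :=
  (PySem.List.pyRange 0 (genres.length : Int) 1).map (fun i => (i, pvP plays i))
def pvIdx (genres : List String) (g : String) : List Int :=
  (PySem.List.pyRange 0 (genres.length : Int) 1).filter (fun i => pvG genres i == g)
def pvT (genres : List String) (plays : List Int) (g : String) : Int :=
  ((pvIdx genres g).map (pvP plays)).sum
def pvFlt (genres : List String) (plays : List Int) (g : String) : List (Int × Int) :=
  (pvSongs genres plays).filter (fun s => pvG genres s.1 == g)
def pvSg (genres : List String) (plays : List Int) (g : String) : List (Int × Int) :=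
  PySem.List.sorted (pvFlt genres plays g) (fun s => s.2) true
-- common normal form of both programs
def pvAnswer (genres : List String) (plays : List Int) : List Int :=
  (PySem.List.sorted (PySem.Set.ofList genres) (pvT genres plays) true).foldl
    (fun acc g => acc ++ ((pvSg genres plays g).take 2).map (fun s => s.1)) []
-- the strict order a reverse-stable sort by plays leaves on distinct-index songs
def pvR (a b : Int × Int) : Prop := b.2 < a.2 ∨ (a.2 = b.2 ∧ a.1 < b.1)

theorem pv_insertBy_pairwise (x : Int × Int) (acc : List (Int × Int))
    (h1 : acc.Pairwise pvR) (h2 : ∀ y ∈ acc, y.1 < x.1) :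
    (PySem.List.insertBy (fun a b => decide (b.2 < a.2)) x acc).Pairwise pvR := by
  induction acc with
  | nil => simp [PySem.List.insertBy, pvR]
  | cons y ys ih =>
    rcases List.pairwise_cons.1 h1 with ⟨hy, hys⟩
    by_cases h : y.2 < x.2
    · simp only [PySem.List.insertBy, h, decide_true, if_true]
      refine List.pairwise_cons.2 ⟨?_, h1⟩
      intro z hz
      rcases List.mem_cons.1 hz with rfl | hz
      · exact Or.inl h
      · rcases hy z hz with h' | ⟨h', _⟩ <;> exact Or.inl (by omega)
    · simp only [PySem.List.insertBy, h, decide_false, Bool.false_eq_true, if_false]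
      refine List.pairwise_cons.2
        ⟨?_, ih hys (fun z hz => h2 z (List.mem_cons_of_mem _ hz))⟩
      intro z hz
      rcases (PySem.List.mem_insertBy _ _ _ _).1 hz with rfl | hz
      · by_cases h' : z.2 < y.2
        · exact Or.inl h'
        · exact Or.inr ⟨by omega, h2 y List.mem_cons_self⟩
      · exact hy z hz

-- stability: reverse-sorting by plays a list of strictly increasing indices yields pvR order
theorem pv_sorted_rev_stable (l : List (Int × Int))
    (h : l.Pairwise (fun a b => a.1 < b.1)) :
    (PySem.List.sorted l (fun s => s.2) true).Pairwise pvR := by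
  rw [PySem.List.sorted_rev_eq_foldl_insertBy]
  suffices H : ∀ (l' acc : List (Int × Int)),
      l'.Pairwise (fun a b => a.1 < b.1) → acc.Pairwise pvR →
      (∀ y ∈ acc, ∀ x ∈ l', y.1 < x.1) →
      (l'.foldl (fun acc x =>
        PySem.List.insertBy (fun a b => decide (b.2 < a.2)) x acc) acc).Pairwise pvR by
    exact H l [] h (by simp) (by simp)
  intro l'
  induction l' with
  | nil => intro acc _ h2 _; simpa using h2
  | cons x xs ih =>
    intro acc h1 h2 h3
    rcases List.pairwise_cons.1 h1 with ⟨hx, hxs⟩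
    simp only [List.foldl_cons]
    refine ih _ hxs
      (pv_insertBy_pairwise x acc h2 (fun y hy => h3 y hy x List.mem_cons_self)) ?_
    intro y hy z hz
    rcases (PySem.List.mem_insertBy _ _ _ _).1 hy with hy' | hy'
    · subst hy'; exact hx z hz
    · exact h3 y hy' z (List.mem_cons_of_mem _ hz)

theorem pv_insertBy_map {α β : Type} (f : α → β) (bf : β → β → Bool) (x : α) :
    ∀ (m : List α),
      PySem.List.insertBy bf (f x) (m.map f) =
        (PySem.List.insertBy (fun a b => bf (f a) (f b)) x m).map f := by
  intro m
  induction m with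
  | nil => simp [PySem.List.insertBy]
  | cons y ys ih =>
    simp only [List.map_cons, PySem.List.insertBy]
    by_cases h : bf (f x) (f y)
    · simp [h]
    · simp [h, ih]

theorem pv_sorted_map_rev {α β : Type} (f : α → β) (l : List α) (key : β → Int) :
    PySem.List.sorted (l.map f) key true =
      (PySem.List.sorted l (fun x => key (f x)) true).map f := by
  rw [PySem.List.sorted_rev_eq_foldl_insertBy, PySem.List.sorted_rev_eq_foldl_insertBy,
    List.foldl_map]
  suffices H : ∀ (m : List α) (acc : List α),
      m.foldl (fun acc x => PySem.List.insertBy (fun a b => decide (key b < key a)) (f x) acc)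
        (acc.map f) =
      (m.foldl (fun acc x =>
        PySem.List.insertBy (fun a b => decide (key (f b) < key (f a))) x acc) acc).map f by
    simpa using H l []
  intro m
  induction m with
  | nil => intro acc; rfl
  | cons x xs ih =>
    intro acc
    simp only [List.foldl_cons]
    rw [pv_insertBy_map f _ x acc, ih]

-- A's first loop, made uniform: genre -> (running total, song list in index order)
theorem pv_getD_groupLoop (G : Int → String) (P : Int → Int) (l : List Int) :
    ∀ (d : PySem.Dict String (Int × List (Int × Int))) (g : String),
      (l.foldl (fun d i =>
        d.insert (G i) ((d.getD (G i) ((0 : Int), ([] : List (Int × Int)))).1 + P i,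
          (d.getD (G i) ((0 : Int), ([] : List (Int × Int)))).2 ++ [(i, P i)])) d).getD g
          ((0 : Int), ([] : List (Int × Int))) =
      ((d.getD g ((0 : Int), ([] : List (Int × Int)))).1 +
          ((l.filter (fun i => G i == g)).map P).sum,
        (d.getD g ((0 : Int), ([] : List (Int × Int)))).2 ++
          (l.filter (fun i => G i == g)).map (fun i => (i, P i))) := by
  induction l with
  | nil => intro d g; simp
  | cons i is ih =>
    intro d g
    simp only [List.foldl_cons, List.filter_cons]
    rw [ih]
    by_cases h : G i = g
    · simp [h, add_assoc]
    · have h' : ¬ (G i == g) = true := by simpa using h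
      have h'' : g ≠ G i := fun hh => h hh.symm
      simp [h', PySem.Dict.getD_insert, h'']

-- A's per-genre sort loop
theorem pv_getD_sortLoop (ks : List String) :
    ∀ (d : PySem.Dict String (Int × List (Int × Int))) (g : String), ks.Nodup →
      (ks.foldl (fun d k =>
        d.insert k ((d.getD k ((0 : Int), ([] : List (Int × Int)))).1,
          PySem.List.sorted (d.getD k ((0 : Int), ([] : List (Int × Int)))).2
            (fun item => item.2) true)) d).getD g ((0 : Int), ([] : List (Int × Int))) =
      if g ∈ ks then
        ((d.getD g ((0 : Int), ([] : List (Int × Int)))).1,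
          PySem.List.sorted (d.getD g ((0 : Int), ([] : List (Int × Int)))).2
            (fun item => item.2) true)
      else d.getD g ((0 : Int), ([] : List (Int × Int))) := by
  induction ks with
  | nil => intro d g _; simp
  | cons k ks ih =>
    intro d g hnd
    rcases List.nodup_cons.1 hnd with ⟨hk, hnd'⟩
    simp only [List.foldl_cons]
    rw [ih _ _ hnd']
    by_cases hgk : g = k
    · subst hgk
      simp [hk]
    · by_cases hg : g ∈ ks <;> simp [hg, hgk, PySem.Dict.getD_insert]

-- B's totals loop
theorem pv_getD_totalsLoop (l : List (String × Int)) :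
    ∀ (d : PySem.Dict String Int) (g : String),
      (l.foldl (fun d gp => d.insert gp.1 (d.getD gp.1 0 + gp.2)) d).getD g 0 =
        d.getD g 0 + ((l.filter (fun gp => gp.1 == g)).map (fun gp => gp.2)).sum := by
  induction l with
  | nil => intro d g; simp
  | cons gp l ih =>
    intro d g
    simp only [List.foldl_cons, List.filter_cons]
    rw [ih]
    by_cases h : gp.1 = g
    · simp [h, add_assoc]
    · have h' : ¬ (gp.1 == g) = true := by simpa using h
      have h'' : g ≠ gp.1 := fun hh => h hh.symm
      simp [h', PySem.Dict.getD_insert, h'']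

theorem pv_set_update_self (xs : List String) :
    ∀ (s : PySem.Set String), (∀ x ∈ xs, x ∈ s) → PySem.Set.update s xs = s := by
  induction xs with
  | nil => intro s _; rfl
  | cons x xs ih =>
    intro s h
    have : PySem.Set.update s (x :: xs) = PySem.Set.update (PySem.Set.add s x) xs := rfl
    rw [this, PySem.Set.add_of_mem (h x List.mem_cons_self)]
    exact ih s (fun y hy => h y (List.mem_cons_of_mem _ hy))

theorem pv_zip_eq (genres : List String) (plays : List Int)
    (hPre : genres.length ≤ plays.length) :
    genres.zip plays =
      (PySem.List.pyRange 0 (genres.length : Int) 1).map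
        (fun i => (pvG genres i, pvP plays i)) := by
  apply List.ext_getElem
  · simp [PySem.List.length_pyRange_one, Nat.min_eq_left hPre]
  · intro k h1 h2
    have hk : k < genres.length := by
      simpa [Nat.min_eq_left hPre] using h1
    have hkp : k < plays.length := lt_of_lt_of_le hk hPre
    have hr : k < (PySem.List.pyRange 0 (genres.length : Int) 1).length := by
      simpa [PySem.List.length_pyRange_one] using hk
    simp only [List.getElem_map, List.getElem_zip, PySem.List.getElem_pyRange_one _ _ k hr]
    simp only [pvG, pvP, zero_add]
    rw [PySem.List.pyGetD_eq_getElem _ _ (by omega) (by exact_mod_cast hk),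
      PySem.List.pyGetD_eq_getElem _ _ (by omega) (by exact_mod_cast hkp)]
    simp

theorem pv_slice2 (xs : List Int) : PySem.List.slice xs none (some 2) = xs.take 2 := by
  have h := PySem.List.slice_to_natCast xs 2
  simpa using h

theorem pv_top2 (acc : List Int) (l : List (Int × Int)) :
    (if PySem.List.len l ≤ 0 then acc
     else
       if PySem.List.len l ≤ 1 then acc ++ [(PySem.List.pyGetD l 0 ((0 : Int), (0 : Int))).1]
       else (acc ++ [(PySem.List.pyGetD l 0 ((0 : Int), (0 : Int))).1])
         ++ [(PySem.List.pyGetD l 1 ((0 : Int), (0 : Int))).1]) =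
    acc ++ (l.take 2).map (fun s => s.1) := by
  match l with
  | [] => simp [PySem.List.len_eq]
  | [a] =>
    have h0 : ¬ (PySem.List.len [a] ≤ 0) := by simp [PySem.List.len_eq]
    have h1 : PySem.List.len [a] ≤ 1 := by simp [PySem.List.len_eq]
    have g0 : PySem.List.pyGetD [a] (0 : Int) ((0 : Int), (0 : Int)) = a := by
      rw [PySem.List.pyGetD_eq_getElem _ _ (by norm_num) (by norm_num)]
      simp [Int.toNat_zero]
    rw [if_neg h0, if_pos h1, g0]
    simp
  | a :: b :: t =>
    have h0 : ¬ (PySem.List.len (a :: b :: t) ≤ 0) := by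
      simp only [PySem.List.len_eq, List.length_cons]
      omega
    have h1 : ¬ (PySem.List.len (a :: b :: t) ≤ 1) := by
      simp only [PySem.List.len_eq, List.length_cons]
      omega
    have g0 : PySem.List.pyGetD (a :: b :: t) (0 : Int) ((0 : Int), (0 : Int)) = a := by
      rw [PySem.List.pyGetD_eq_getElem _ _ (by norm_num)
        (by simp only [List.length_cons]; push_cast; omega)]
      simp [Int.toNat_zero]
    have g1 : PySem.List.pyGetD (a :: b :: t) (1 : Int) ((0 : Int), (0 : Int)) = b := by
      rw [PySem.List.pyGetD_eq_getElem _ _ (by norm_num)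
        (by simp only [List.length_cons]; push_cast; omega)]
      simp [Int.toNat_one]
    rw [if_neg h0, if_neg h1, g0, g1]
    simp [List.take]

-- the heart: per-genre stable sort = filter of the one global stable sort
theorem pv_pergenre (genres : List String) (plays : List Int) (g : String) :
    pvSg genres plays g =
      (PySem.List.sorted (pvSongs genres plays) (fun s => s.2) true).filter
        (fun s => pvG genres s.1 == g) := by
  have hsongs : (pvSongs genres plays).Pairwise (fun a b => a.1 < b.1) := by
    refine List.Pairwise.map _ ?_ (PySem.List.pairwise_lt_pyRange_one 0 _)
    intro a b h; exact h
  have hL : (pvSg genres plays g).Pairwise pvR :=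
    pv_sorted_rev_stable _ (hsongs.filter _)
  have hRR : ((PySem.List.sorted (pvSongs genres plays) (fun s => s.2) true).filter
      (fun s => pvG genres s.1 == g)).Pairwise pvR :=
    (pv_sorted_rev_stable _ hsongs).filter _
  have hperm : (pvSg genres plays g).Perm
      ((PySem.List.sorted (pvSongs genres plays) (fun s => s.2) true).filter
        (fun s => pvG genres s.1 == g)) := by
    refine (PySem.List.sorted_perm _ _ _).trans ?_
    exact ((PySem.List.sorted_perm (pvSongs genres plays) (fun s => s.2) true).filter _).symm
  refine List.Perm.eq_of_pairwise ?_ hL hRR hperm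
  intro a b _ _ hab hba
  exfalso
  rcases hab with h | ⟨h, h'⟩ <;> rcases hba with h2 | ⟨h2, h2'⟩ <;> omega

-- A reduced to the common normal form
theorem pv_solution_eq (genres : List String) (plays : List Int) :
    solution genres plays = pvAnswer genres plays := by
  unfold solution
  simp only [PySem.List.len_eq]
  -- step 1: the grouping loop, branch-free
  have hcongr : ∀ (d : PySem.Dict String (Int × List (Int × Int))),
      ∀ i ∈ PySem.List.pyRange 0 (genres.length : Int) 1,
      (if d.contains (PySem.List.pyGetD genres i "") then
        d.insert (PySem.List.pyGetD genres i "")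
          ((d.getD (PySem.List.pyGetD genres i "") (0, [])).1 + PySem.List.pyGetD plays i 0,
            (d.getD (PySem.List.pyGetD genres i "") (0, [])).2
              ++ [(i, PySem.List.pyGetD plays i 0)])
      else
        d.insert (PySem.List.pyGetD genres i "")
          (PySem.List.pyGetD plays i 0, [(i, PySem.List.pyGetD plays i 0)])) =
      d.insert (pvG genres i)
        ((d.getD (pvG genres i) ((0 : Int), ([] : List (Int × Int)))).1 + pvP plays i,
          (d.getD (pvG genres i) ((0 : Int), ([] : List (Int × Int)))).2 ++ [(i, pvP plays i)]) := by
    intro d i _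
    by_cases h : d.contains (PySem.List.pyGetD genres i "") = true
    · simp [h, pvG, pvP]
    · have h' : d.contains (PySem.List.pyGetD genres i "") = false := by
        simpa using h
      rw [if_neg (by simp [h'])]
      rw [show d.getD (pvG genres i) ((0 : Int), ([] : List (Int × Int))) = (0, []) from
        PySem.Dict.getD_of_not_contains _ _ h']
      simp [pvG, pvP]
  rw [PySem.List.foldl_congr_mem _ _ _ _ hcongr]
  set gd := (PySem.List.pyRange 0 (genres.length : Int) 1).foldl (fun d i =>
    d.insert (pvG genres i)
      ((d.getD (pvG genres i) ((0 : Int), ([] : List (Int × Int)))).1 + pvP plays i,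
        (d.getD (pvG genres i) ((0 : Int), ([] : List (Int × Int)))).2 ++ [(i, pvP plays i)]))
    PySem.Dict.empty with hgd
  have hkeys : gd.keys = PySem.Set.ofList genres := by
    rw [hgd, PySem.Dict.keys_foldl_insert_key _ (fun i => pvG genres i) _ _,
      PySem.Dict.keys_empty, PySem.Set.update_nil_left]
    congr 1
    simpa [pvG] using PySem.List.map_pyGetD_pyRange_zero' genres ""
  have hnodup : gd.keys.Nodup := by
    rw [hgd]
    exact PySem.Dict.nodup_keys_foldl_insert_key _ _ _ _ (by simp)
  have hgetD : ∀ g, gd.getD g ((0 : Int), ([] : List (Int × Int))) =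
      (pvT genres plays g, pvFlt genres plays g) := by
    intro g
    rw [hgd, pv_getD_groupLoop]
    simp only [PySem.Dict.getD_empty, List.nil_append, zero_add, Prod.mk.injEq]
    refine ⟨rfl, ?_⟩
    unfold pvFlt pvSongs
    rw [List.filter_map]
    exact congrArg _ (List.filter_congr (fun x _ => rfl))
  -- step 2: the per-genre sort loop and the items of the resulting dict
  set gd2 := gd.keys.foldl (fun d k =>
    d.insert k ((d.getD k ((0 : Int), ([] : List (Int × Int)))).1,
      PySem.List.sorted (d.getD k ((0 : Int), ([] : List (Int × Int)))).2
        (fun item => item.2) true)) gd with hgd2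
  have hnodup2 : gd2.keys.Nodup := by
    rw [hgd2]
    exact PySem.Dict.nodup_keys_foldl_insert_key _ (fun k => k) _ _ hnodup
  have hkeys2 : gd2.keys = gd.keys := by
    rw [hgd2, PySem.Dict.keys_foldl_insert_key _ (fun k => k) _ _]
    simp only [List.map_id']
    exact pv_set_update_self _ _ (fun x hx => hx)
  have hitems : gd2.items = (PySem.Set.ofList genres).map
      (fun k => (k, (pvT genres plays k, pvSg genres plays k))) := by
    rw [PySem.Dict.items_eq_map_keys gd2 hnodup2 ((0 : Int), ([] : List (Int × Int))),
      hkeys2, hkeys]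
    refine List.map_congr_left ?_
    intro k hk
    rw [hgd2, pv_getD_sortLoop _ _ _ hnodup, if_pos (by rwa [hkeys] at *), hgetD]
    rfl
  rw [hitems, pv_sorted_map_rev]
  have hkeyfun : (fun x => ((fun k => (k, (pvT genres plays k, pvSg genres plays k))) x).2.1)
      = pvT genres plays := funext (fun k => rfl)
  rw [hkeyfun, List.foldl_map]
  unfold pvAnswer
  refine PySem.List.foldl_congr_mem _ _ _ _ ?_
  intro acc g _
  simpa using pv_top2 acc (pvSg genres plays g)

-- B's grouping pass over the globally sorted song list
theorem pv_getD_top2Loop (genres : List String) (l : List (Int × Int)) :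
    ∀ (d : PySem.Dict String (List Int)) (g : String),
      (l.foldl (fun d s =>
        d.modify (PySem.List.pyGetD genres s.1 "") [] (fun t => t ++ [s.1])) d).getD g [] =
        d.getD g [] ++
          (l.filter (fun s => PySem.List.pyGetD genres s.1 "" == g)).map (fun s => s.1) := by
  induction l with
  | nil => intro d g; simp
  | cons s l ih =>
    intro d g
    simp only [List.foldl_cons, List.filter_cons]
    rw [ih]
    by_cases h : PySem.List.pyGetD genres s.1 "" = g
    · simp [h]
    · have h' : ¬ (PySem.List.pyGetD genres s.1 "" == g) = true := by simpa using h
      have h'' : g ≠ PySem.List.pyGetD genres s.1 "" := fun hh => h hh.symm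
      simp [h', PySem.Dict.getD_modify, h'']

-- B reduced to the common normal form (plays at least as long as genres)
theorem pv_solution_alt_eq (genres : List String) (plays : List Int)
    (hPre : genres.length ≤ plays.length) :
    solution_alt genres plays = pvAnswer genres plays := by
  unfold solution_alt
  simp only [PySem.List.len_eq]
  set totals := (genres.zip plays).foldl
    (fun d gp => d.insert gp.1 (d.getD gp.1 0 + gp.2)) PySem.Dict.empty with htot
  have hkeysB : totals.keys = PySem.Set.ofList genres := by
    have h : totals.keys = PySem.Set.update (PySem.Dict.empty : PySem.Dict String Int).keys
        ((genres.zip plays).map (fun gp : String × Int => gp.1)) := by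
      rw [htot]
      exact PySem.Dict.keys_foldl_insert_key _ _ _ _
    have hm : (genres.zip plays).map (fun gp : String × Int => gp.1) = genres :=
      List.map_fst_zip hPre
    rw [h, hm, PySem.Dict.keys_empty, PySem.Set.update_nil_left]
  have htotB : (fun g => totals.getD g 0) = pvT genres plays := by
    funext g
    rw [htot, pv_getD_totalsLoop, PySem.Dict.getD_empty, zero_add,
      pv_zip_eq genres plays hPre, List.filter_map, List.map_map]
    rw [List.filter_congr (fun (x : Int) _ => (rfl :
      ((fun gp : String × Int => gp.1 == g) ∘ fun i => (pvG genres i, pvP plays i)) x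
        = (fun i : Int => pvG genres i == g) x))]
    rw [List.map_congr_left (fun (x : Int) _ => (rfl :
      ((fun gp : String × Int => gp.2) ∘ fun i => (pvG genres i, pvP plays i)) x
        = pvP plays x))]
    rfl
  rw [hkeysB, htotB]
  refine PySem.List.foldl_congr_mem _ _ _ _ ?_
  intro acc g _
  rw [pv_getD_top2Loop, PySem.Dict.getD_empty, List.nil_append, pv_slice2,
    ← List.map_take, pv_pergenre genres plays g]
  rfl

-- ===== VERDICT (by name: the statement is the Claim_ definition above) =====
theorem solution_spec : Claim_equal_solution := by
  intro genres plays _ hPre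
  unfold Spec_solution
  rw [pv_solution_eq, pv_solution_alt_eq genres plays hPre]
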